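-- pv_equiv track=rewrite | github.com/hazelian0619/graph-rag | molecule/pipelines/molecule_structure_identifiers/scripts/02_qa_molecule_structure_identifiers_v1.py | unique_ik_stats
-- ===== SOURCE A (Python) =====
-- from typing import Any, Dict, List, Tuple
--
-- def normalize(x: str) -> str:
--     return (x or "").strip()
--
-- def unique_ik_stats(rows: List[Dict[str, str]]) -> Tuple[int, int]:
--     seen = set()
--     dup = 0
--     for row in rows:
--         ik = normalize(row.get("inchikey", "")).upper()
--         if ik in seen:
--             dup += 1
--         else:
--             seen.add(ik)
--     return len(seen), dup
-- ===== SOURCE B (Python) =====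
-- from typing import Any, Dict, List, Tuple
--
--
-- def normalize(x: str) -> str:
--     return (x or "").strip()
--
--
-- def unique_ik_stats(rows: List[Dict[str, str]]) -> Tuple[int, int]:
--     keys = sorted(normalize(row.get("inchikey", "")).upper() for row in rows)
--     dup = sum(1 for prev, cur in zip(keys, keys[1:]) if prev == cur)
--     return len(keys) - dup, dup
-- ===== Notes on version B (the rewrite author's own statement) =====
-- stated objective: alternative
-- what changed: B sorts the normalized uppercased keys and counts duplicates as adjacent equal pairs in the sorted list (sort-then-scan), instead of A's one-pass seen-set membership branch with a running dup counter; uniques follow by subtraction.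
import Mathlib
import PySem

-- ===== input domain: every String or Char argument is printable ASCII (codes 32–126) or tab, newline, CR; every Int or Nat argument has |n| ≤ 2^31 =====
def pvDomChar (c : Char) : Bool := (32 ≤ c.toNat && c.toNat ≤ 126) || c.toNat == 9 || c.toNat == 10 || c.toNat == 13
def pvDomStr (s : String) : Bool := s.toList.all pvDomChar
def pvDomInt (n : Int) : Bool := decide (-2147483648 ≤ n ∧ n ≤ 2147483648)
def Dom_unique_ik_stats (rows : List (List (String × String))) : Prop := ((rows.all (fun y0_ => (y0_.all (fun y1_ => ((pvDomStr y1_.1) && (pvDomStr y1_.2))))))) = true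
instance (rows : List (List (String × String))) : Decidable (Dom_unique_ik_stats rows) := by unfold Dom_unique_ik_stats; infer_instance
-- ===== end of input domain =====

-- B sorts the normalized keys and counts duplicates as adjacent equal pairs
-- (sort-then-scan) instead of A's seen-set membership loop (objective: alternative).
-- ===== PORT A =====
-- normalize(x) = (x or "").strip(); on strings 'x or ""' is x when nonempty, "" otherwise — strip gives the same result either way
def pvNormalize (x : String) : String := PySem.Str.strip x

def pvKey (row : List (String × String)) : String :=
  PySem.Str.upper (pvNormalize ((PySem.Dict.mk row).getD "inchikey" ""))

def unique_ik_stats (rows : List (List (String × String))) : Int × Int :=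
  let st := rows.foldl (fun (st : PySem.Set String × Int) row =>
    let ik := pvKey row
    if PySem.Set.contains st.1 ik then (st.1, st.2 + 1)
    else (PySem.Set.add st.1 ik, st.2)) (PySem.Set.empty, 0)
  ((st.1.length : Int), st.2)

-- ===== PORT B =====
-- keys = sorted(<generator of normalized keys>); dup = sum(1 for prev, cur in zip(keys, keys[1:]) if prev == cur)
def unique_ik_stats_alt (rows : List (List (String × String))) : Int × Int :=
  let keys := PySem.List.sorted (rows.map pvKey) (fun x => x) false
  let dup := (keys.zip (PySem.List.slice keys (some 1) none)).foldl
      (fun (acc : Int) p => if p.1 == p.2 then acc + 1 else acc) 0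
  ((keys.length : Int) - dup, dup)

-- ===== PRECONDITION & SPEC =====
def Spec_unique_ik_stats (rows : List (List (String × String))) (out : Int × Int) : Prop := out = unique_ik_stats_alt rows
instance (rows : List (List (String × String))) (out : Int × Int) : Decidable (Spec_unique_ik_stats rows out) := by unfold Spec_unique_ik_stats; infer_instance

-- ===== CLAIM (what is proved, stated in full; the proofs are below) =====
def Claim_equal_unique_ik_stats : Prop := ∀ (rows : List (List (String × String))), Dom_unique_ik_stats rows → Spec_unique_ik_stats rows (unique_ik_stats rows)

-- ===== LEMMAS AND PROOFS =====
-- loop invariant for A's fold: final seen = Set.add-fold over the keys, and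
-- dup = processed count minus the number of freshly added keys
theorem pvFold_inv (rows : List (List (String × String))) (seen : PySem.Set String) (d : Int) :
    rows.foldl (fun (st : PySem.Set String × Int) row =>
      let ik := pvKey row
      if PySem.Set.contains st.1 ik then (st.1, st.2 + 1)
      else (PySem.Set.add st.1 ik, st.2)) (seen, d)
    = ((rows.map pvKey).foldl PySem.Set.add seen,
       d + (rows.length : Int)
         - (((rows.map pvKey).foldl PySem.Set.add seen).length : Int)
         + (seen.length : Int)) := by
  induction rows generalizing seen d with
  | nil => simp
  | cons r rest ih =>
    simp only [List.foldl_cons, List.map_cons, List.length_cons]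
    by_cases h : pvKey r ∈ seen
    · rw [if_pos (by simpa [PySem.Set.contains_iff] using h)]
      rw [ih, PySem.Set.add_of_mem h]
      refine Prod.ext rfl ?_
      push_cast; ring
    · rw [if_neg (by simpa [PySem.Set.contains_iff] using h)]
      rw [ih, PySem.Set.add_of_not_mem h]
      refine Prod.ext rfl ?_
      simp only [List.length_append, List.length_singleton]
      push_cast; ring

-- in a ≤-sorted list, adjacent-equal pairs + distinct values = length
theorem pvAdj_of_pairwise (l : List String) (h : l.Pairwise (· ≤ ·)) :
    (l.zip l.tail).countP (fun p => p.1 == p.2) + l.toFinset.card = l.length := by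
  induction l with
  | nil => simp
  | cons a t ih =>
    cases t with
    | nil => simp
    | cons b t' =>
      obtain ⟨hab, htl⟩ := List.pairwise_cons.mp h
      have hbt := ih htl
      simp only [List.tail_cons] at hbt ⊢
      simp only [List.length_cons] at hbt
      by_cases hEq : a = b
      · subst hEq
        have hfs : (a :: a :: t').toFinset.card = (a :: t').toFinset.card := by
          simp [List.toFinset_cons]
        have hcp : ((a :: a :: t').zip (a :: t')).countP (fun p => p.1 == p.2)
            = ((a :: t').zip t').countP (fun p => p.1 == p.2) + 1 := by
          simp [List.zip_cons_cons]
        rw [hcp, hfs]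
        simp only [List.length_cons]
        omega
      · have hnotmem : a ∉ (b :: t').toFinset := by
          intro hmem
          rcases List.mem_cons.mp (List.mem_toFinset.mp hmem) with h1 | h2
          · exact hEq h1
          · obtain ⟨hbtl, _⟩ := List.pairwise_cons.mp htl
            exact hEq (le_antisymm (hab b (List.mem_cons_self)) (hbtl a h2))
        have hcard : (a :: b :: t').toFinset.card = (b :: t').toFinset.card + 1 := by
          rw [List.toFinset_cons, Finset.card_insert_of_notMem hnotmem]
        have hne : ¬ ((((a, b).1 : String) == (a, b).2) = true) := by simpa using hEq
        simp only [List.zip_cons_cons, List.countP_cons, if_neg hne, hcard, List.length_cons]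
        omega

-- Set.ofList has as many elements as the list has distinct values
theorem pvOfList_length (l : List String) :
    (PySem.Set.ofList l).length = l.toFinset.card := by
  have hfs : (PySem.Set.ofList l).toFinset = l.toFinset := by
    ext x
    simp [List.mem_toFinset, PySem.Set.mem_ofList]
  rw [← hfs, List.toFinset_card_of_nodup (PySem.Set.nodup_ofList l)]

-- ===== VERDICT (by name: the statement is the Claim_ definition above) =====
theorem unique_ik_stats_spec : Claim_equal_unique_ik_stats := by
  intro rows _
  unfold Spec_unique_ik_stats unique_ik_stats unique_ik_stats_alt
  simp only [pvFold_inv, PySem.List.slice_from_one, PySem.Set.empty, List.length_nil]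
  rw [← PySem.Set.ofList_eq_foldl, PySem.List.foldl_if_add_one]
  set keys := rows.map pvKey with hk
  set s := PySem.List.sorted keys (fun x => x) false with hs
  have hadj : (s.zip s.tail).countP (fun p => p.1 == p.2) + s.toFinset.card = s.length :=
    pvAdj_of_pairwise s (by simpa using PySem.List.sorted_pairwise keys (fun x => x))
  have hperm : s.Perm keys := PySem.List.sorted_perm keys (fun x => x) false
  have hcard : s.toFinset.card = keys.toFinset.card := by rw [List.toFinset_eq_of_perm _ _ hperm]
  have hlen : s.length = keys.length := hperm.length_eq
  have hol : (PySem.Set.ofList keys).length = keys.toFinset.card := pvOfList_length keys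
  have hlk : keys.length = rows.length := by rw [hk, List.length_map]
  refine Prod.ext ?_ ?_ <;> push_cast <;> omega
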